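-- pv_equiv track=rewrite | github.com/Anishanks/optical-network-wm | scripts/subsample.py | group_by_policy
-- ===== SOURCE A (Python) =====
-- from collections import Counter, defaultdict
--
-- def group_by_policy(episode_ids):
--     buckets = defaultdict(list)
--     for eid in episode_ids:
--         policy = eid.split("_", 2)[-1]
--         buckets[policy].append(eid)
--     for policy in buckets:
--         buckets[policy].sort()
--     return buckets
-- ===== SOURCE B (Python) =====
-- from collections import defaultdict
--
--
-- def _insort(bucket, eid):
--     """Insert eid into the sorted list bucket, keeping it sorted
--     (after any equal elements), using binary search for the position."""
--     lo, hi = 0, len(bucket)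
--     while lo < hi:
--         mid = (lo + hi) // 2
--         if eid < bucket[mid]:
--             hi = mid
--         else:
--             lo = mid + 1
--     bucket.insert(lo, eid)
--
--
-- def group_by_policy(episode_ids):
--     buckets = defaultdict(list)
--     for eid in episode_ids:
--         _insort(buckets[eid.split("_", 2)[-1]], eid)
--     return buckets
-- ===== Notes on version B (the rewrite author's own statement) =====
-- stated objective: alternative
-- what changed: A groups all ids into buckets and then sorts each bucket at the end; B keeps every bucket sorted as it goes, placing each id by binary-search insertion in a single grouping pass.
import Mathlib
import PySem

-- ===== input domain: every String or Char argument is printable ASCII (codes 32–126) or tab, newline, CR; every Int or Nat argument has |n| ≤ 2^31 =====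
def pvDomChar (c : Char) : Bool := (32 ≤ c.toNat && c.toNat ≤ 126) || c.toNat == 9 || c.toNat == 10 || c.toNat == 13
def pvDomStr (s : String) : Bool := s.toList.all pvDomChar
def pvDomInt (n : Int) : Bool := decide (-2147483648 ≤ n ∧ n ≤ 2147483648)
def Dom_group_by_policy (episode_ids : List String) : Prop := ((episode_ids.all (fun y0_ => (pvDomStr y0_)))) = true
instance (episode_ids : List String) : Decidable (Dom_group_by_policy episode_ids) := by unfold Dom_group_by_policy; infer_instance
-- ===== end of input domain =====

-- B replaces A's group-then-sort-each-bucket by a single grouping pass that keeps every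
-- bucket sorted via binary-search insertion; same return value, alternative decomposition.


-- ===== PORT A =====
-- eid.split("_", 2)[-1]  (split never yields an empty list, so the [-1] always exists; getD "" is unreachable)
def pvKey (e : String) : String :=
  match PySem.Str.splitMax? e "_" 2 with
  | some parts => (PySem.List.pyGet? parts (-1)).getD ""
  | none => ""

def group_by_policy (episode_ids : List String) : List (String × List String) :=
  let buckets := episode_ids.foldl
    (fun d e => d.modify (pvKey e) [] (fun v => v ++ [e])) PySem.Dict.empty
  let buckets := buckets.keys.foldl
    (fun d policy => d.modify policy [] (fun v => PySem.List.sorted v (fun x => x) false)) buckets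
  buckets.items

-- ===== PORT B =====
-- the while loop of _insort: lo, hi with bucket[mid] (always in range, so getD "" is unreachable)
def pvBisect (bucket : List String) (eid : String) (lo hi : Nat) : Nat :=
  if lo < hi then
    -- mid = (lo + hi) // 2
    if eid < bucket.getD ((lo + hi) / 2) "" then pvBisect bucket eid lo ((lo + hi) / 2)
    else pvBisect bucket eid ((lo + hi) / 2 + 1) hi
  else lo
termination_by hi - lo
decreasing_by all_goals omega

-- _insort(bucket, eid): binary-search position, then bucket.insert(lo, eid)
def pvInsort (bucket : List String) (eid : String) : List String :=
  PySem.List.insert bucket (pvBisect bucket eid 0 bucket.length : Nat) eid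

def group_by_policy_alt (episode_ids : List String) : List (String × List String) :=
  let buckets := episode_ids.foldl
    (fun d e => d.modify (pvKey e) [] (fun v => pvInsort v e)) PySem.Dict.empty
  buckets.items

-- ===== PRECONDITION & SPEC =====
def Spec_group_by_policy (episode_ids : List String) (out : List (String × List String)) : Prop := out = group_by_policy_alt episode_ids
instance (episode_ids : List String) (out : List (String × List String)) : Decidable (Spec_group_by_policy episode_ids out) := by unfold Spec_group_by_policy; infer_instance

-- ===== CLAIM (what is proved, stated in full; the proofs are below) =====
def Claim_equal_group_by_policy : Prop := ∀ (episode_ids : List String), Dom_group_by_policy episode_ids → Spec_group_by_policy episode_ids (group_by_policy episode_ids)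

-- ===== LEMMAS AND PROOFS =====

-- the value stored under c by A's grouping loop is the filter of the input
theorem pv_getD_group (xs : List String) (c : String) :
    (xs.foldl (fun d e => d.modify (pvKey e) [] (fun v => v ++ [e])) PySem.Dict.empty).getD c []
      = xs.filter (fun e => pvKey e == c) := by
  have h : xs.foldl (fun d e => d.modify (pvKey e) [] (fun v => v ++ [e])) PySem.Dict.empty
      = (xs.map (fun e => (pvKey e, e))).foldl (fun d p => d.modify p.1 [] (fun v => v ++ [p.2])) PySem.Dict.empty := by
    rw [List.foldl_map]
  rw [h, PySem.Dict.getD_foldl_modify_append, PySem.Dict.getD_empty, List.filter_map, List.map_map]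
  simp [Function.comp_def]

-- a "modify every listed key with f" loop, for idempotent f
theorem pv_getD_sortloop (f : List String → List String)
    (hf : ∀ v, f (f v) = f v)
    (l : List String) (d : PySem.Dict String (List String)) (x : String) :
    (l.foldl (fun d p => d.modify p [] f) d).getD x []
      = if x ∈ l then f (d.getD x []) else d.getD x [] := by
  induction l generalizing d with
  | nil => simp
  | cons a t ih =>
    simp only [List.foldl_cons, ih, PySem.Dict.getD_modify, List.mem_cons]
    by_cases hxa : x = a
    · subst hxa
      by_cases hxt : x ∈ t <;> simp [hxt, hf]
    · by_cases hxt : x ∈ t <;> simp [hxt, hxa]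

-- updating a nodup set with itself changes nothing
theorem pv_set_update_self (s : List String) (_hs : s.Nodup) : PySem.Set.update s s = s := by
  rw [PySem.Set.update_eq_append_filter]
  have h0 : (PySem.Set.ofList s).filter (fun y => !(PySem.Set.contains s y)) = [] := by
    apply List.filter_eq_nil_iff.mpr
    intro a ha
    have has : a ∈ s := (PySem.Set.mem_ofList _ _).mp ha
    simp [PySem.Set.contains_eq_listContains, has]
  rw [h0, List.append_nil]

-- the value stored under c by B's grouping loop is the pvInsort-fold of the filter
theorem pv_getD_insfold (xs : List String) (d : PySem.Dict String (List String)) (c : String) :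
    (xs.foldl (fun d e => d.modify (pvKey e) [] (fun v => pvInsort v e)) d).getD c []
      = (xs.filter (fun e => pvKey e == c)).foldl (fun v e => pvInsort v e) (d.getD c []) := by
  induction xs generalizing d with
  | nil => simp
  | cons a t ih =>
    simp only [List.foldl_cons, ih, List.filter_cons]
    by_cases hc : pvKey a = c
    · simp [hc]
    · have hb : (pvKey a == c) = false := by simp [hc]
      rw [PySem.Dict.getD_modify, if_neg (fun h => hc h.symm), hb]
      simp

-- the binary search maintains: everything left of the answer is ≤ eid, everything from it on is > eid
theorem pvBisect_invariant (v : List String) (e : String) (hs : v.Pairwise (· ≤ ·)) :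
    ∀ (lo hi : Nat), lo ≤ hi → hi ≤ v.length →
    (∀ j, j < lo → (hj : j < v.length) → ¬ e < v[j]) →
    (∀ j, hi ≤ j → (hj : j < v.length) → e < v[j]) →
    lo ≤ pvBisect v e lo hi ∧ pvBisect v e lo hi ≤ hi ∧
    (∀ j, j < pvBisect v e lo hi → (hj : j < v.length) → ¬ e < v[j]) ∧
    (∀ j, pvBisect v e lo hi ≤ j → (hj : j < v.length) → e < v[j]) := by
  intro lo hi
  induction lo, hi using pvBisect.induct v e with
  | case1 lo hi hlt h1 ih =>
    intro _ hhi hlo2 hhi2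
    have hmid : (lo + hi) / 2 < v.length := by omega
    have hgd : v.getD ((lo + hi) / 2) "" = v[(lo + hi) / 2] := by
      simp [List.getD, List.getElem?_eq_getElem hmid]
    rw [pvBisect, if_pos hlt, if_pos h1]
    have hstep : ∀ j, (lo + hi) / 2 ≤ j → (hj : j < v.length) → e < v[j] := by
      intro j hj hjl
      have hle : v[(lo + hi) / 2] ≤ v[j] := by
        rcases Nat.eq_or_lt_of_le hj with h | h
        · subst h; exact le_refl _
        · exact (List.pairwise_iff_getElem.mp hs) _ j hmid hjl h
      exact lt_of_lt_of_le (by rw [← hgd]; exact h1) hle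
    have hres := ih (by omega) (by omega) hlo2 hstep
    exact ⟨hres.1, by omega, hres.2.2.1, hres.2.2.2⟩
  | case2 lo hi hlt h1 ih =>
    intro _ hhi hlo2 hhi2
    have hmid : (lo + hi) / 2 < v.length := by omega
    have hgd : v.getD ((lo + hi) / 2) "" = v[(lo + hi) / 2] := by
      simp [List.getD, List.getElem?_eq_getElem hmid]
    have h1' : ¬ e < v[(lo + hi) / 2] := by rw [← hgd]; exact h1
    rw [pvBisect, if_pos hlt, if_neg h1]
    have hstep : ∀ j, j < (lo + hi) / 2 + 1 → (hj : j < v.length) → ¬ e < v[j] := by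
      intro j hj hjl hcon
      have hje : j ≤ (lo + hi) / 2 := by omega
      have hle : v[j] ≤ v[(lo + hi) / 2] := by
        rcases Nat.eq_or_lt_of_le hje with h | h
        · subst h; exact le_refl _
        · exact (List.pairwise_iff_getElem.mp hs) j _ hjl hmid h
      exact h1' (lt_of_lt_of_le hcon hle)
    have hres := ih (by omega) hhi hstep hhi2
    exact ⟨by omega, hres.2.1, hres.2.2.1, hres.2.2.2⟩
  | case3 lo hi hge =>
    intro hle hhi hlo2 hhi2
    rw [pvBisect, if_neg hge]
    exact ⟨le_refl _, hle, hlo2, fun j hj hjl => hhi2 j (by omega) hjl⟩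

-- insertBy places x at any position r with "≤ x before, > x from r on"
theorem pv_insertBy_eq (e : String) (v : List String) :
    ∀ (r : Nat), r ≤ v.length →
    (∀ j, j < r → (hj : j < v.length) → ¬ e < v[j]) →
    (∀ (h : r < v.length), e < v[r]) →
    PySem.List.insertBy (fun a b => decide (a < b)) e v = v.take r ++ e :: v.drop r := by
  induction v with
  | nil =>
    intro r hr _ _
    have : r = 0 := by simpa using hr
    subst this
    simp [PySem.List.insertBy]
  | cons a t ih =>
    intro r hr h1 h2
    cases r with
    | zero =>
      have : e < a := h2 (by simp)
      simp [PySem.List.insertBy, this]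
    | succ r' =>
      have hna : ¬ e < a := h1 0 (by omega) (by simp)
      simp only [PySem.List.insertBy, decide_eq_true_eq, if_neg hna, List.take_succ_cons,
        List.drop_succ_cons, List.cons_append, List.cons.injEq, true_and]
      exact ih r' (by simpa using hr)
        (fun j hj hjl => h1 (j + 1) (by omega) (by simpa using hjl))
        (fun h => h2 (by simpa using h))

-- insertBy keeps the list sorted
theorem pv_insertBy_pairwise (e : String) (v : List String) (hs : v.Pairwise (· ≤ ·)) :
    (PySem.List.insertBy (fun a b => decide (a < b)) e v).Pairwise (· ≤ ·) := by
  induction v with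
  | nil => simp [PySem.List.insertBy]
  | cons a t ih =>
    rcases List.pairwise_cons.mp hs with ⟨ha, ht⟩
    by_cases h : e < a
    · simp only [PySem.List.insertBy, decide_eq_true_eq, if_pos h]
      refine List.pairwise_cons.mpr ⟨?_, hs⟩
      intro b hb
      rcases List.mem_cons.mp hb with rfl | hb
      · exact le_of_lt h
      · exact le_trans (le_of_lt h) (ha b hb)
    · simp only [PySem.List.insertBy, decide_eq_true_eq, if_neg h]
      refine List.pairwise_cons.mpr ⟨?_, ih ht⟩
      intro b hb
      rcases (PySem.List.mem_insertBy _ _ _ _).mp hb with rfl | hb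
      · exact le_of_not_gt h
      · exact ha b hb

-- on a sorted bucket, binary-search insertion is insertBy
theorem pv_insort_eq (v : List String) (e : String) (hs : v.Pairwise (· ≤ ·)) :
    pvInsort v e = PySem.List.insertBy (fun a b => decide (a < b)) e v := by
  obtain ⟨hlo, hhi, h1, h2⟩ := pvBisect_invariant v e hs 0 v.length (by omega) (le_refl _)
    (by omega) (by omega)
  unfold pvInsort
  rw [PySem.List.insert_natCast v (pvBisect v e 0 v.length) e hhi,
    pv_insertBy_eq e v (pvBisect v e 0 v.length) hhi h1 (fun h => h2 _ (le_refl _) h)]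

-- folding pvInsort from [] is folding insertBy from [], i.e. Python's sorted
theorem pv_foldl_insort (l : List String) :
    l.foldl (fun v e => pvInsort v e) [] = PySem.List.sorted l (fun x => x) false := by
  rw [PySem.List.sorted_eq_foldl_insertBy]
  have main : ∀ (acc : List String), acc.Pairwise (· ≤ ·) →
      l.foldl (fun v e => pvInsort v e) acc
        = l.foldl (fun acc x => PySem.List.insertBy (fun a b => decide (a < b)) x acc) acc := by
    induction l with
    | nil => intro acc _; rfl
    | cons a t ih =>
      intro acc hacc
      simp only [List.foldl_cons]
      rw [pv_insort_eq acc a hacc]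
      exact ih _ (pv_insertBy_pairwise a acc hacc)
  exact main [] (by simp)

-- ===== VERDICT (by name: the statement is the Claim_ definition above) =====
theorem group_by_policy_spec : Claim_equal_group_by_policy := by
  intro xs _
  unfold Spec_group_by_policy group_by_policy group_by_policy_alt
  dsimp only
  set d1 := xs.foldl (fun d e => d.modify (pvKey e) [] (fun v => v ++ [e])) PySem.Dict.empty with hd1
  set db := xs.foldl (fun d e => d.modify (pvKey e) [] (fun v => pvInsort v e)) PySem.Dict.empty with hdb
  have hkeys1 : d1.keys = PySem.Set.update [] (xs.map pvKey) := by
    rw [hd1, PySem.Dict.keys_foldl_modify_key, PySem.Dict.keys_empty]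
  have hkeysb : db.keys = PySem.Set.update [] (xs.map pvKey) := by
    rw [hdb, PySem.Dict.keys_foldl_modify_key, PySem.Dict.keys_empty]
  have hnd1 : d1.keys.Nodup := by
    rw [hd1]
    exact PySem.Dict.nodup_keys_foldl_modify_key _ _ _ _ _ (by simp)
  have hndb : db.keys.Nodup := by
    rw [hdb]
    exact PySem.Dict.nodup_keys_foldl_modify_key _ _ _ _ _ (by simp)
  set d2 := d1.keys.foldl
    (fun d policy => d.modify policy [] (fun v => PySem.List.sorted v (fun x => x) false)) d1 with hd2
  have hkeys2 : d2.keys = d1.keys := by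
    rw [hd2, PySem.Dict.keys_foldl_modify, pv_set_update_self _ hnd1]
  have hnd2 : d2.keys.Nodup := by rw [hkeys2]; exact hnd1
  rw [PySem.Dict.items_eq_map_keys d2 hnd2 ([] : List String), hkeys2, hkeys1,
      PySem.Dict.items_eq_map_keys db hndb ([] : List String), hkeysb]
  apply List.map_congr_left
  intro c hc
  have hcmem : c ∈ d1.keys := by rw [hkeys1]; exact hc
  have hval : d2.getD c [] = PySem.List.sorted (d1.getD c []) (fun x => x) false := by
    rw [hd2, pv_getD_sortloop _ (fun v => PySem.List.sorted_sorted v (fun x => x)), if_pos hcmem]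
  have hvalb : db.getD c [] = (xs.filter (fun e => pvKey e == c)).foldl (fun v e => pvInsort v e) [] := by
    rw [hdb, pv_getD_insfold, PySem.Dict.getD_empty]
  rw [hval, hvalb, pv_getD_group, pv_foldl_insort]
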